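-- pv_equiv track=rewrite | github.com/SI201-UMich/fall25-project1-kiului | project1_kiului.py | _group_by_species_sex
-- ===== SOURCE A (Python) =====
-- def _group_by_species_sex(rows):
--     """
--     Build a dictionary: (species, sex) -> list of body_mass_g values
--     """
--     groups = {}
--     for r in rows:
--         sp = r.get("species")
--         sx = r.get("sex")
--         bm = r.get("body_mass_g")
--         if sp is None or sx is None or bm is None:
--             continue
--         key = (sp, sx)
--         if key not in groups:
--             groups[key] = []
--         groups[key].append(bm)
--     return groups
-- ===== SOURCE B (Python) =====
-- def _group_by_species_sex(rows):
--     # Alternative decomposition: extract valid ((species, sex), mass) pairs once,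
--     # dedup the keys in first-appearance order, then build each group's list by
--     # one comprehension over the extracted pairs (no incremental dict mutation).
--     pairs = [((r["species"], r["sex"]), r["body_mass_g"])
--              for r in rows
--              if r.get("species") is not None
--              and r.get("sex") is not None
--              and r.get("body_mass_g") is not None]
--     keys = list(dict.fromkeys(k for k, _ in pairs))
--     return {k: [bm for kk, bm in pairs if kk == k] for k in keys}
-- ===== Notes on version B (the rewrite author's own statement) =====
-- stated objective: alternative
-- what changed: Replaces the single-pass dict accumulation (check-membership, create-empty, append per row) with a filter-extract pass producing ((species,sex),mass) pairs, an ordered key dedup, and one comprehension per key that collects that key's masses.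
import Mathlib
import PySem

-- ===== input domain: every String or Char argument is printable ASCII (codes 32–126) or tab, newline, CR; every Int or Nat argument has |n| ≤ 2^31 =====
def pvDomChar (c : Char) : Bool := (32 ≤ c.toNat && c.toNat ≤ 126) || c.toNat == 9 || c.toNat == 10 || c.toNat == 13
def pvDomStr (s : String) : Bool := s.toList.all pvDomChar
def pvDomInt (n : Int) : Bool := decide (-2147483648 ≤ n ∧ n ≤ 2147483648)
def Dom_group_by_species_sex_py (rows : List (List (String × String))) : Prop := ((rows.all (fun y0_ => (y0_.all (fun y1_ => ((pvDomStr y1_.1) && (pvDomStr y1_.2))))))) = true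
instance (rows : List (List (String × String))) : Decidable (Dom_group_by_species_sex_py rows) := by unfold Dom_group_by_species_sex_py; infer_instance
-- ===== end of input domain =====

-- B replaces A's single-pass dict accumulation with filter-extract + ordered key dedup + one collection pass per key (alternative decomposition, same results).


-- ===== PORT A =====
-- one loop iteration of A: fetch the three fields, skip if any is missing,
-- otherwise create the key's empty list if absent and append the mass
def pvAStep (g : PySem.Dict (String × String) (List String)) (r : List (String × String)) :
    PySem.Dict (String × String) (List String) :=
  match (PySem.Dict.mk r).get? "species", (PySem.Dict.mk r).get? "sex",
        (PySem.Dict.mk r).get? "body_mass_g" with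
  | some sp, some sx, some bm =>
      let key := (sp, sx)
      let g1 := if g.contains key then g else g.insert key []
      g1.modify key [] (fun l => l ++ [bm])
  | _, _, _ => g

def group_by_species_sex_py (rows : List (List (String × String))) : List (String × String × List String) :=
  let groups := rows.foldl pvAStep PySem.Dict.empty
  groups.items.map (fun p => (p.1.1, p.1.2, p.2))

-- ===== PORT B =====
def pvBTriple (r : List (String × String)) : Option ((String × String) × String) :=
  match (PySem.Dict.mk r).get? "species", (PySem.Dict.mk r).get? "sex",
        (PySem.Dict.mk r).get? "body_mass_g" with
  | some sp, some sx, some bm => some ((sp, sx), bm)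
  | _, _, _ => none

def group_by_species_sex_py_alt (rows : List (List (String × String))) : List (String × String × List String) :=
  let pairs := rows.filterMap pvBTriple
  let keys := PySem.List.dedup (pairs.map (fun p => p.1))
  keys.map (fun k => (k.1, k.2, (pairs.filter (fun p => p.1 == k)).map (fun p => p.2)))

-- ===== PRECONDITION & SPEC =====
def Spec_group_by_species_sex_py (rows : List (List (String × String))) (out : List (String × String × List String)) : Prop := out = group_by_species_sex_py_alt rows
instance (rows : List (List (String × String))) (out : List (String × String × List String)) : Decidable (Spec_group_by_species_sex_py rows out) := by unfold Spec_group_by_species_sex_py; infer_instance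

-- ===== CLAIM (what is proved, stated in full; the proofs are below) =====
def Claim_equal_group_by_species_sex_py : Prop := ∀ (rows : List (List (String × String))), Dom_group_by_species_sex_py rows → Spec_group_by_species_sex_py rows (group_by_species_sex_py rows)

-- ===== LEMMAS AND PROOFS =====

-- A's per-row step, restricted to extracted pairs, is exactly one Dict.modify
theorem pvAStep_eq_modify (g : PySem.Dict (String × String) (List String))
    (k : String × String) (bm : String) :
    (let g1 := if g.contains k then g else g.insert k []
     g1.modify k [] (fun l => l ++ [bm])) = g.modify k [] (fun l => l ++ [bm]) := by
  by_cases h : g.contains k = true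
  · simp [h]
  · have hmod : ∀ (d : PySem.Dict (String × String) (List String)),
        d.modify k [] (fun l => l ++ [bm]) = d.insert k ((d.getD k []) ++ [bm]) := by
      intro d; simp [PySem.Dict.modify, PySem.Dict.getD]
    rw [if_neg h, hmod, hmod, PySem.Dict.getD_insert_self, PySem.Dict.insert_insert_self,
        PySem.Dict.getD_of_not_contains g [] (by simpa using h)]

-- folding A's step over rows is folding one modify per extracted pair
theorem pvAFold_eq (rows : List (List (String × String)))
    (g : PySem.Dict (String × String) (List String)) :
    rows.foldl pvAStep g =
      (rows.filterMap pvBTriple).foldl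
        (fun d p => d.modify p.1 [] (fun l => l ++ [p.2])) g := by
  induction rows generalizing g with
  | nil => rfl
  | cons r rest ih =>
    simp only [List.foldl_cons, List.filterMap_cons]
    have hstep : pvAStep g r = match pvBTriple r with
        | some p => g.modify p.1 [] (fun l => l ++ [p.2])
        | none => g := by
      unfold pvAStep pvBTriple
      rcases h1 : (PySem.Dict.mk r).get? "species" with _ | sp <;>
        rcases h2 : (PySem.Dict.mk r).get? "sex" with _ | sx <;>
          rcases h3 : (PySem.Dict.mk r).get? "body_mass_g" with _ | bm <;>
            simp [pvAStep_eq_modify]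
    rcases h : pvBTriple r with _ | p
    · rw [ih]; simp [hstep, h]
    · simp only [List.foldl_cons]; rw [ih]; simp [hstep, h]

theorem group_by_species_sex_py_eq_alt (rows : List (List (String × String))) :
    group_by_species_sex_py rows = group_by_species_sex_py_alt rows := by
  unfold group_by_species_sex_py group_by_species_sex_py_alt
  dsimp only
  set pairs := rows.filterMap pvBTriple with hpairs
  rw [pvAFold_eq]
  set d := pairs.foldl (fun d p => d.modify p.1 [] (fun l => l ++ [p.2])) PySem.Dict.empty with hd
  have hnd : d.keys.Nodup := by
    rw [hd]
    exact PySem.Dict.nodup_keys_foldl_modify_key pairs (fun p => p.1) []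
      (fun d p => (fun l => l ++ [p.2])) PySem.Dict.empty PySem.Dict.nodup_keys_empty
  have hkeys : d.keys = PySem.List.dedup (pairs.map (fun p => p.1)) := by
    rw [hd]
    rw [PySem.Dict.keys_foldl_modify_key pairs (fun p => p.1) []
      (fun d p => (fun l => l ++ [p.2])) PySem.Dict.empty]
    simp only [PySem.Set.update, PySem.Dict.keys_empty, PySem.List.dedup_eq_ofList]
    exact (PySem.Set.ofList_eq_foldl _).symm
  have hgetD : ∀ k, d.getD k [] = (pairs.filter (fun p => p.1 == k)).map (fun p => p.2) := by
    intro k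
    rw [hd, PySem.Dict.getD_foldl_modify_append]
    simp [PySem.Dict.getD_empty]
  rw [PySem.Dict.items_eq_map_keys d hnd [], hkeys]
  simp only [List.map_map]
  apply List.map_congr_left
  intro k _
  simp [hgetD k]

-- ===== VERDICT (by name: the statement is the Claim_ definition above) =====
theorem group_by_species_sex_py_spec : Claim_equal_group_by_species_sex_py := by
  intro rows _
  unfold Spec_group_by_species_sex_py
  exact group_by_species_sex_py_eq_alt rows
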